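-- pv_equiv track=rewrite | github.com/sbneo2022/SHFT | tools/arbitrage_proof/lib/sifchain.py | getExchangeIntersection
-- ===== SOURCE A (Python) =====
-- from typing import Dict, Optional, Union, List, Iterable, Tuple
--
-- BASES = ["USDC", "USDT", "UST"]
--
-- def getExchangeIntersection(
--     bepswap: Iterable[str], exchange: Iterable[str]
-- ) -> Tuple[Optional[List[str]], Optional[str]]:
--     """
--     Get interesection of pools and symbols between both exchanges.
--
--     Args:
--         bepswap (Iterable[str]): The list of assets for the dex
--         exchange (Iterable[str]): The list of assets for the cex
--
--     Returns:
--         Tuple[Optional[List[str]], Optional[str]]: List of asset for the dex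
--             filtered.
--     """
--     return_me = []
--     for item in bepswap:
--         for base in BASES:
--             if item + base in exchange:
--                 return_me.append(item)
--                 break
--
--     return (return_me, None)
-- ===== SOURCE B (Python) =====
-- BASES = ["USDC", "USDT", "UST"]
--
-- def getExchangeIntersection(bepswap, exchange):
--     prefixes = set()
--     for sym in exchange:
--         for base in BASES:
--             if sym.endswith(base):
--                 prefixes.add(sym[:-len(base)])
--     return ([item for item in bepswap if item in prefixes], None)
-- ===== Notes on version B (the rewrite author's own statement) =====
-- stated objective: faster
-- what changed: Instead of testing item+base membership in exchange for every bepswap item and base (a linear scan of exchange per test), B scans exchange once, strips each recognised base suffix into a set of prefixes, and filters bepswap by set membership.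
import Mathlib
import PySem

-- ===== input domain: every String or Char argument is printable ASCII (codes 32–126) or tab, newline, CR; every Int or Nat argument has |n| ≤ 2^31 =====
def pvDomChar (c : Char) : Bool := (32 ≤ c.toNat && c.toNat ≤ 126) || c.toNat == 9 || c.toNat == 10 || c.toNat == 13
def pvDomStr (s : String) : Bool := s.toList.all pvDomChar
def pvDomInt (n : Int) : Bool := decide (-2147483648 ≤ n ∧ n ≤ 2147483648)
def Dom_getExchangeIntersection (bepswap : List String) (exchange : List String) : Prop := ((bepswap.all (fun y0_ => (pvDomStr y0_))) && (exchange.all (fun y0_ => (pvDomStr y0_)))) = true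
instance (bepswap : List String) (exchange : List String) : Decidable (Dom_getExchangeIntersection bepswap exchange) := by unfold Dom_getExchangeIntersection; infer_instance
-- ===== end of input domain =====

-- B builds a set of base-stripped prefixes from exchange in one pass and filters bepswap by set
-- membership, replacing A's per-item-per-base linear scans of exchange (objective: faster).

def pvBASES : List String := ["USDC", "USDT", "UST"]

-- ===== PORT A =====
-- inner 'for base in BASES: if item + base in exchange: append; break' — returns whether item is appended
def pvAnyBase (exchange : List String) (item : String) : List String → Bool
  | [] => false
  | base :: rest =>
      if exchange.contains (item ++ base) then true else pvAnyBase exchange item rest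

def getExchangeIntersection (bepswap : List String) (exchange : List String) : Option (List String) × Option String :=
  let return_me := bepswap.foldl
    (fun acc item => if pvAnyBase exchange item pvBASES then acc ++ [item] else acc) []
  (some return_me, none)

-- ===== PORT B =====
-- prefixes = {sym[:-len(base)] for sym in exchange for base in BASES if sym.endswith(base)}
def pvPrefixes (exchange : List String) : PySem.Set String :=
  exchange.foldl
    (fun s sym => pvBASES.foldl
      (fun s base =>
        if PySem.Str.endswith sym base then
          PySem.Set.add s (PySem.Str.slice sym none (some (-(PySem.Str.len base))))
        else s) s)
    PySem.Set.empty

def getExchangeIntersection_alt (bepswap : List String) (exchange : List String) : Option (List String) × Option String :=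
  let prefixes := pvPrefixes exchange
  (some (bepswap.filter (fun item => PySem.Set.contains prefixes item)), none)

-- ===== PRECONDITION & SPEC =====
def Spec_getExchangeIntersection (bepswap : List String) (exchange : List String) (out : Option (List String) × Option String) : Prop := out = getExchangeIntersection_alt bepswap exchange
instance (bepswap : List String) (exchange : List String) (out : Option (List String) × Option String) : Decidable (Spec_getExchangeIntersection bepswap exchange out) := by unfold Spec_getExchangeIntersection; infer_instance

-- ===== CLAIM (what is proved, stated in full; the proofs are below) =====
def Claim_equal_getExchangeIntersection : Prop := ∀ (bepswap : List String) (exchange : List String), Dom_getExchangeIntersection bepswap exchange → Spec_getExchangeIntersection bepswap exchange (getExchangeIntersection bepswap exchange)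

-- ===== LEMMAS AND PROOFS =====

-- A's inner break-loop succeeds iff some base makes item ++ base a member of exchange
lemma pvAnyBase_iff (exchange : List String) (item : String) (bases : List String) :
    pvAnyBase exchange item bases = true ↔ ∃ base ∈ bases, (item ++ base) ∈ exchange := by
  induction bases with
  | nil => simp [pvAnyBase]
  | cons b rest ih =>
      by_cases h : (item ++ b) ∈ exchange <;>
        simp [pvAnyBase, h, ih]

-- the suffix-strip equation characterises exactly the concatenations sym = item ++ base
lemma pvStrip_eq_iff (sym item base : String) (hb : base.toList ≠ []) :
    (PySem.Str.endswith sym base = true ∧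
      PySem.Str.slice sym none (some (-(PySem.Str.len base))) = item) ↔ sym = item ++ base := by
  rw [show (PySem.Str.slice sym none (some (-(PySem.Str.len base))) = item) ↔
      ((PySem.Str.slice sym none (some (-(PySem.Str.len base)))).toList = item.toList) from
    (String.toList_inj).symm]
  rw [show (sym = item ++ base) ↔ (sym.toList = item.toList ++ base.toList) from by
    rw [← String.toList_inj, String.toList_append]]
  rw [PySem.Str.toList_slice, PySem.Chars.slice_eq_listSlice, PySem.Str.len_eq,
    PySem.List.slice_to_neg_natCast sym.toList base.toList.length
      (List.length_pos_iff.mpr hb),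
    PySem.Str.endswith_eq, PySem.Chars.endswith_iff]
  constructor
  · rintro ⟨⟨pre, hpre⟩, htake⟩
    rw [← hpre, List.length_append, Nat.add_sub_cancel, List.take_left] at htake
    rw [← hpre, htake]
  · intro h
    rw [h]
    constructor
    · exact List.suffix_append _ _
    · rw [List.length_append, Nat.add_sub_cancel, List.take_left]

-- membership after one conditional add
lemma pvMem_condAdd {c : Bool} (s : PySem.Set String) (x y : String) :
    x ∈ (if c = true then PySem.Set.add s y else s) ↔ x ∈ s ∨ (c = true ∧ x = y) := by
  cases c <;> simp [PySem.Set.mem_add]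

-- membership in the prefix set built by B's double loop
lemma pvMem_step (s : PySem.Set String) (sym x : String) :
    x ∈ pvBASES.foldl
      (fun s base =>
        if PySem.Str.endswith sym base then
          PySem.Set.add s (PySem.Str.slice sym none (some (-(PySem.Str.len base))))
        else s) s ↔
    x ∈ s ∨ ∃ base ∈ pvBASES, PySem.Str.endswith sym base = true ∧
      PySem.Str.slice sym none (some (-(PySem.Str.len base))) = x := by
  simp only [pvBASES, List.foldl]
  rw [pvMem_condAdd, pvMem_condAdd, pvMem_condAdd]
  simp only [List.mem_cons, List.not_mem_nil, or_false, exists_eq_or_imp, exists_eq_left,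
    eq_comm (b := x), or_assoc]

lemma pvMem_prefixFold (exchange : List String) (s : PySem.Set String) (x : String) :
    x ∈ exchange.foldl
      (fun s sym => pvBASES.foldl
        (fun s base =>
          if PySem.Str.endswith sym base then
            PySem.Set.add s (PySem.Str.slice sym none (some (-(PySem.Str.len base))))
          else s) s) s ↔
    x ∈ s ∨ ∃ sym ∈ exchange, ∃ base ∈ pvBASES, PySem.Str.endswith sym base = true ∧
      PySem.Str.slice sym none (some (-(PySem.Str.len base))) = x := by
  induction exchange generalizing s with
  | nil => simp
  | cons e rest ih =>
      rw [List.foldl_cons, ih, pvMem_step]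
      constructor
      · rintro (⟨h | h⟩ | ⟨sym, hsym, h⟩)
        · exact Or.inl h
        · exact Or.inr ⟨e, by simp, h⟩
        · exact Or.inr ⟨sym, by simp [hsym], h⟩
      · rintro (h | ⟨sym, hsym, h⟩)
        · exact Or.inl (Or.inl h)
        · rcases List.mem_cons.mp hsym with rfl | hsym
          · exact Or.inl (Or.inr h)
          · exact Or.inr ⟨sym, hsym, h⟩

-- the two membership tests agree on every item
lemma pvPredicates_agree (exchange : List String) (item : String) :
    pvAnyBase exchange item pvBASES = PySem.Set.contains (pvPrefixes exchange) item := by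
  rw [Bool.eq_iff_iff, pvAnyBase_iff]
  have hc : PySem.Set.contains (pvPrefixes exchange) item = true ↔ item ∈ pvPrefixes exchange := by
    simp [PySem.Set.contains]
  rw [hc, pvPrefixes, pvMem_prefixFold]
  simp only [PySem.Set.empty, List.not_mem_nil, false_or]
  constructor
  · rintro ⟨base, hbase, hmem⟩
    refine ⟨item ++ base, hmem, base, hbase, ?_⟩
    have hb : base.toList ≠ [] := by fin_cases hbase <;> decide
    exact (pvStrip_eq_iff (item ++ base) item base hb).mpr rfl
  · rintro ⟨sym, hsym, base, hbase, hcond⟩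
    have hb : base.toList ≠ [] := by fin_cases hbase <;> decide
    have := (pvStrip_eq_iff sym item base hb).mp hcond
    exact ⟨base, hbase, this ▸ hsym⟩

-- ===== VERDICT (by name: the statement is the Claim_ definition above) =====
theorem getExchangeIntersection_spec : Claim_equal_getExchangeIntersection := by
  intro bepswap exchange _
  unfold Spec_getExchangeIntersection getExchangeIntersection getExchangeIntersection_alt
  have := PySem.List.foldl_append_if (fun item => pvAnyBase exchange item pvBASES)
    (fun x => x) bepswap []
  simp only [this, List.map_id_fun', id, List.nil_append]
  have : (fun item => pvAnyBase exchange item pvBASES) =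
      (fun item => PySem.Set.contains (pvPrefixes exchange) item) := by
    funext item; exact pvPredicates_agree exchange item
  rw [this]
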